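-- pv_equiv track=rewrite | github.com/Fondamenti18/fondamenti-di-programmazione | students/1757075/homework01/program03.py | disord
-- ===== SOURCE A (Python) =====
-- def disord(chiave):
--     # lista per eliminare caratteri
--     elimina = []
--     # metto caratteri da eliminare nella lista elimina
--     for c in chiave:
--         if c < 'a' or c > 'z':
--             elimina.append(c)
--     # elimino caratteri da chiave
--     for c in elimina:
--         chiave = chiave.replace(c, '')
--     # elimino le occorrenze e creo sequenza disordinata
--     dis = set(chiave)               # creo set con singole occorrenze
--     disordinata = ''                  # sequenza disordinata
--     for c in reversed(chiave):        # itero chiave al contrario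
--         if c in dis:                # verifico se e' un occorrenza
--             disordinata = c + disordinata       # modifico stringa
--             dis.remove(c)           # rimuovo da set per evitare doppioni
--     return disordinata
-- ===== SOURCE B (Python) =====
-- def disord(chiave):
--     # one forward pass: remember each lowercase char's most recent index,
--     # then emit the chars ordered by that stored last index
--     last = {}
--     for i, c in enumerate(chiave):
--         if 'a' <= c <= 'z':
--             last[c] = i
--     return ''.join(c for c, _ in sorted(last.items(), key=lambda kv: kv[1]))
-- ===== Notes on version B (the rewrite author's own statement) =====
-- stated objective: alternative
-- what changed: Replaces A's build-a-removal-list + repeated str.replace passes + reverse-scan-with-seen-set by a single forward pass recording each lowercase char's last index in a dict, then emitting the (at most 26 distinct) chars sorted by that index.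
import Mathlib
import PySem

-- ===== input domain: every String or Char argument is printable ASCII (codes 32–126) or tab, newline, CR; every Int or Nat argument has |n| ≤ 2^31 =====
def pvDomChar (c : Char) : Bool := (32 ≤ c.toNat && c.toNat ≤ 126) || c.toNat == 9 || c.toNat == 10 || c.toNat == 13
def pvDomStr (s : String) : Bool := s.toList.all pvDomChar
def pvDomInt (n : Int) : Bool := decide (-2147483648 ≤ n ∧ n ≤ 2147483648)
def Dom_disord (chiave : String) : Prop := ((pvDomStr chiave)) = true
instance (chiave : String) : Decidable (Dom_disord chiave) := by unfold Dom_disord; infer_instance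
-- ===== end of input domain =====

-- B replaces A's removal-list + repeated str.replace passes + reverse scan with a seen-set
-- by one forward pass recording each lowercase char's last index, then emitting by sorted index.

-- ===== PORT A =====
def disord (chiave : String) : String :=
  let elimina : List Char :=
    chiave.toList.foldl (fun acc c => if c < 'a' ∨ 'z' < c then acc ++ [c] else acc) []
  let chiave2 : List Char :=
    elimina.foldl (fun t c => PySem.Chars.replace t [c] []) chiave.toList
  let dis : PySem.Set Char := PySem.Set.ofList chiave2
  -- dis.remove(c) runs only under 'if c in dis', where it equals Set.discard (no KeyError)
  let st := chiave2.reverse.foldl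
    (fun (st : PySem.Set Char × List Char) c =>
      if PySem.Set.contains st.1 c = true then (PySem.Set.discard st.1 c, c :: st.2) else st)
    (dis, [])
  String.ofList st.2

-- ===== PORT B =====
def disord_alt (chiave : String) : String :=
  let last : PySem.Dict Char Int :=
    (PySem.List.enumerate chiave.toList 0).foldl
      (fun d p => if 'a' ≤ p.2 ∧ p.2 ≤ 'z' then d.insert p.2 p.1 else d)
      PySem.Dict.empty
  String.ofList ((PySem.List.sorted last.items (fun kv => kv.2)).map (fun kv => kv.1))

-- ===== PRECONDITION & SPEC =====
def Spec_disord (chiave : String) (out : String) : Prop := out = disord_alt chiave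
instance (chiave : String) (out : String) : Decidable (Spec_disord chiave out) := by unfold Spec_disord; infer_instance

-- ===== CLAIM (what is proved, stated in full; the proofs are below) =====
def Claim_equal_disord : Prop := ∀ (chiave : String), Dom_disord chiave → Spec_disord chiave (disord chiave)

-- ===== LEMMAS AND PROOFS =====

-- lowercase filter of a char list
def pvLow (s : List Char) : List Char := s.filter (fun c => decide ('a' ≤ c ∧ c ≤ 'z'))

-- model of A's reverse loop: final accumulator as a function of remaining input and the seen-set
def pvG : List Char → PySem.Set Char → List Char
  | [], _ => []
  | c :: r, dis =>
      if PySem.Set.contains dis c = true then pvG r (PySem.Set.discard dis c) ++ [c]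
      else pvG r dis

-- the common normal form: (char, last index) pairs in last-occurrence order
def pvI : List Char → Int → List (Char × Int)
  | [], _ => []
  | c :: s, k => if ('a' ≤ c ∧ c ≤ 'z') ∧ c ∉ s then (c, k) :: pvI s (k + 1) else pvI s (k + 1)

-- its char projection
def pvJ : List Char → List Char
  | [] => []
  | c :: s => if ('a' ≤ c ∧ c ≤ 'z') ∧ c ∉ s then c :: pvJ s else pvJ s

-- ---- A side: the replace loop is the lowercase filter ----

theorem pv_replace_go (c : Char) : ∀ (fuel : Nat) (l acc : List Char), l.length ≤ fuel →
    PySem.Chars.replace.go [c] [] fuel l acc = acc.reverse ++ l.filter (fun x => !(x == c)) := by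
  intro fuel
  induction fuel with
  | zero =>
    intro l acc h
    have hl : l = [] := by cases l <;> simp_all
    subst hl
    simp [PySem.Chars.replace.go]
  | succ n ih =>
    intro l acc h
    cases l with
    | nil => simp [PySem.Chars.replace.go]
    | cons d t =>
      simp only [PySem.Chars.replace.go]
      by_cases hdc : d = c
      · subst hdc
        have hpre : [d].isPrefixOf (d :: t) = true := by simp [List.isPrefixOf]
        rw [if_pos hpre]
        simp only [List.length_cons, List.length_nil, Nat.zero_add, List.drop_succ_cons,
          List.drop_zero, List.reverse_nil, List.nil_append]
        rw [ih t acc (by simpa using h)]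
        simp [List.filter]
      · have hpre : [c].isPrefixOf (d :: t) = false := by
          simp [List.isPrefixOf]
          exact fun h' => hdc h'.symm
        rw [if_neg (by simp [hpre])]
        rw [ih t (d :: acc) (by simpa using h)]
        have hbc : (d == c) = false := by simp [hdc]
        simp [List.filter, hbc]

theorem pv_replace (l : List Char) (c : Char) :
    PySem.Chars.replace l [c] [] = l.filter (fun x => !(x == c)) := by
  rw [PySem.Chars.replace]
  simp only [List.isEmpty_cons]
  rw [if_neg (by simp)]
  rw [pv_replace_go c l.length l [] le_rfl]
  simp

theorem pv_foldrep : ∀ (e l : List Char),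
    e.foldl (fun t c => PySem.Chars.replace t [c] []) l = l.filter (fun x => !(e.contains x)) := by
  intro e
  induction e with
  | nil => intro l; simp
  | cons c e ih =>
    intro l
    simp only [List.foldl_cons]
    rw [pv_replace, ih, List.filter_filter]
    apply List.filter_congr
    intro x hx
    by_cases hxc : x = c <;> by_cases hxe : x ∈ e <;> simp [hxc, hxe]

theorem pv_elim_fold (s : List Char) : ∀ (acc : List Char),
    s.foldl (fun acc c => if c < 'a' ∨ 'z' < c then acc ++ [c] else acc) acc
      = acc ++ s.filter (fun c => decide (c < 'a' ∨ 'z' < c)) := by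
  induction s with
  | nil => intro acc; simp
  | cons c s ih =>
    intro acc
    simp only [List.foldl_cons, List.filter_cons]
    by_cases h : c < 'a' ∨ 'z' < c
    · rw [if_pos h, ih]
      simp [h]
    · rw [if_neg h, ih]
      simp [h]

theorem pv_chiave2 (s : List Char) :
    (s.foldl (fun acc c => if c < 'a' ∨ 'z' < c then acc ++ [c] else acc) []).foldl
      (fun t c => PySem.Chars.replace t [c] []) s = pvLow s := by
  rw [pv_elim_fold, List.nil_append, pv_foldrep]
  apply List.filter_congr
  intro x hx
  by_cases h : 'a' ≤ x ∧ x ≤ 'z'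
  · have hne : ¬(x < 'a' ∨ 'z' < x) := by
      simp only [not_or, not_lt]
      exact ⟨h.1, h.2⟩
    simp [h, List.mem_filter, hne]
  · have hor : x < 'a' ∨ 'z' < x := by
      rcases not_and_or.mp h with h1 | h1
      · exact Or.inl (not_le.mp h1)
      · exact Or.inr (not_le.mp h1)
    simp [h, List.mem_filter, hx, hor]

-- ---- A side: the reverse loop keeps first occurrences of the reversed string ----

theorem pv_fold_snd : ∀ (r : List Char) (dis : PySem.Set Char) (acc : List Char),
    (r.foldl
      (fun (st : PySem.Set Char × List Char) c =>
        if PySem.Set.contains st.1 c = true then (PySem.Set.discard st.1 c, c :: st.2) else st)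
      (dis, acc)).2 = pvG r dis ++ acc := by
  intro r
  induction r with
  | nil => intro dis acc; simp [pvG]
  | cons c r ih =>
    intro dis acc
    simp only [List.foldl_cons, pvG]
    by_cases h : PySem.Set.contains dis c = true
    · rw [if_pos h, if_pos h, ih]
      simp
    · rw [if_neg h, if_neg h, ih]

theorem pv_discard_comm (S : PySem.Set Char) (a b : Char) :
    PySem.Set.discard (PySem.Set.discard S a) b = PySem.Set.discard (PySem.Set.discard S b) a := by
  simp only [PySem.Set.discard, List.filter_filter]
  apply List.filter_congr
  intro x _
  cases h1 : x == a <;> cases h2 : x == b <;> simp [h1, h2]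

theorem pv_discard_ofList (c : Char) : ∀ (l : List Char),
    PySem.Set.discard (PySem.Set.ofList l) c = PySem.Set.ofList (l.filter (fun x => !(x == c))) := by
  intro l
  induction l with
  | nil => simp [PySem.Set.discard]
  | cons x l ih =>
    rw [PySem.Set.ofList_cons, List.filter_cons]
    by_cases hxc : x = c
    · subst hxc
      rw [if_neg (by simp)]
      rw [← ih]
      show List.filter _ (x :: List.filter _ (PySem.Set.ofList l)) = _
      rw [List.filter_cons, if_neg (by simp), List.filter_filter]
      apply List.filter_congr
      intro y _
      exact Bool.and_self _
    · rw [if_pos (by simp [hxc])]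
      rw [PySem.Set.ofList_cons, ← ih]
      show PySem.Set.discard (x :: PySem.Set.discard (PySem.Set.ofList l) x) c = _
      simp only [PySem.Set.discard, List.filter_cons]
      rw [if_pos (by simp [hxc])]
      rw [← PySem.Set.discard, ← PySem.Set.discard, ← PySem.Set.discard, ← PySem.Set.discard]
      rw [pv_discard_comm]

theorem pv_contains_discard (dis : PySem.Set Char) (c x : Char) :
    PySem.Set.contains (PySem.Set.discard dis c) x = (PySem.Set.contains dis x && !(x == c)) := by
  rw [Bool.eq_iff_iff]
  simp only [Bool.and_eq_true, Bool.not_eq_true', beq_eq_false_iff_ne,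
    PySem.Set.contains_iff, PySem.Set.mem_discard]

theorem pv_G_eq : ∀ (r : List Char) (dis : PySem.Set Char),
    pvG r dis = (PySem.List.dedup (r.filter (fun x => PySem.Set.contains dis x))).reverse := by
  intro r
  induction r with
  | nil => intro dis; simp [pvG, PySem.List.dedup]
  | cons c r ih =>
    intro dis
    simp only [pvG, List.filter_cons]
    by_cases h : PySem.Set.contains dis c = true
    · rw [if_pos h, if_pos h, ih]
      show _ = (PySem.List.dedup (c :: _)).reverse
      rw [show (PySem.List.dedup (c :: r.filter (fun x => PySem.Set.contains dis x)))
            = c :: PySem.Set.discard (PySem.Set.ofList (r.filter (fun x => PySem.Set.contains dis x))) c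
          from PySem.Set.ofList_cons _ _]
      rw [pv_discard_ofList]
      rw [List.reverse_cons]
      congr 2
      show PySem.List.dedup _ = PySem.List.dedup _
      rw [List.filter_filter]
      congr 1
      apply List.filter_congr
      intro x _
      rw [pv_contains_discard]
      exact Bool.and_comm _ _
    · rw [if_neg h, if_neg (by simpa using h), ih]

theorem pv_A_list (t : List Char) :
    pvG t.reverse (PySem.Set.ofList t) = (PySem.List.dedup t.reverse).reverse := by
  rw [pv_G_eq]
  congr 2
  apply List.filter_eq_self.mpr
  intro x hx
  rw [PySem.Set.contains_iff, PySem.Set.mem_ofList]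
  exact List.mem_reverse.mp hx

theorem pv_dedup_last : ∀ (s : List Char),
    (PySem.List.dedup (pvLow s).reverse).reverse = pvJ s := by
  intro s
  induction s with
  | nil => simp [pvLow, pvJ, PySem.List.dedup]
  | cons c s ih =>
    by_cases hl : 'a' ≤ c ∧ c ≤ 'z'
    · have hlow : pvLow (c :: s) = c :: pvLow s := by
        simp [pvLow, List.filter_cons, hl]
      rw [hlow, List.reverse_cons, PySem.List.dedup_eq_ofList, PySem.Set.ofList_append_singleton]
      by_cases hm : c ∈ s
      · have hmem : PySem.Set.contains (PySem.Set.ofList (pvLow s).reverse) c = true := by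
          rw [PySem.Set.contains_iff, PySem.Set.mem_ofList, List.mem_reverse]
          simp [pvLow, List.mem_filter, hm, hl]
        rw [PySem.Set.add, if_pos hmem]
        show (PySem.Set.ofList (pvLow s).reverse).reverse = pvJ (c :: s)
        rw [← PySem.List.dedup_eq_ofList]
        simp only [pvJ]
        rw [if_neg (by simp [hm])]
        exact ih
      · have hmem : PySem.Set.contains (PySem.Set.ofList (pvLow s).reverse) c = false := by
          rw [Bool.eq_false_iff]
          intro hco
          rw [PySem.Set.contains_iff, PySem.Set.mem_ofList, List.mem_reverse] at hco
          exact hm (List.mem_filter.mp hco).1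
        rw [PySem.Set.add, if_neg (by simp [hmem, pvLow, List.mem_filter, hm]), List.reverse_append]
        simp only [pvJ]
        rw [if_pos ⟨hl, hm⟩]
        simp only [List.reverse_cons, List.reverse_nil, List.nil_append, List.singleton_append]
        rw [← PySem.List.dedup_eq_ofList, ih]
    · have hlow : pvLow (c :: s) = pvLow s := by
        simp [pvLow, List.filter_cons, hl]
      rw [hlow]
      simp only [pvJ]
      rw [if_neg (by simp [hl])]
      exact ih

-- ---- B side: the dict's items are a permutation of the normal form ----

theorem pv_J_eq_map_I : ∀ (s : List Char) (k : Int), (pvI s k).map (·.1) = pvJ s := by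
  intro s
  induction s with
  | nil => intro k; simp [pvI, pvJ]
  | cons c s ih =>
    intro k
    simp only [pvI, pvJ]
    by_cases h : ('a' ≤ c ∧ c ≤ 'z') ∧ c ∉ s
    · rw [if_pos h, if_pos h, List.map_cons, ih]
    · rw [if_neg h, if_neg h, ih]

theorem pv_I_bound : ∀ (s : List Char) (k : Int) (p : Char × Int), p ∈ pvI s k → k ≤ p.2 := by
  intro s
  induction s with
  | nil => intro k p hp; simp [pvI] at hp
  | cons c s ih =>
    intro k p hp
    simp only [pvI] at hp
    by_cases h : ('a' ≤ c ∧ c ≤ 'z') ∧ c ∉ s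
    · rw [if_pos h] at hp
      rcases List.mem_cons.mp hp with h1 | h1
      · subst h1; simp
      · exact le_trans (by omega) (ih (k + 1) p h1)
    · rw [if_neg h] at hp
      exact le_trans (by omega) (ih (k + 1) p hp)

theorem pv_I_pairwise : ∀ (s : List Char) (k : Int),
    (pvI s k).Pairwise (fun a b => a.2 < b.2) := by
  intro s
  induction s with
  | nil => intro k; simp [pvI]
  | cons c s ih =>
    intro k
    simp only [pvI]
    by_cases h : ('a' ≤ c ∧ c ≤ 'z') ∧ c ∉ s
    · rw [if_pos h]
      exact List.Pairwise.cons (fun p hp => by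
        have := pv_I_bound s (k + 1) p hp; simp; omega) (ih (k + 1))
    · rw [if_neg h]
      exact ih (k + 1)

theorem pv_I_append : ∀ (s : List Char) (c : Char) (k : Int),
    pvI (s ++ [c]) k =
      if 'a' ≤ c ∧ c ≤ 'z' then (pvI s k).filter (fun p => !(p.1 == c)) ++ [(c, k + s.length)]
      else pvI s k := by
  intro s c
  induction s with
  | nil =>
    intro k
    simp only [List.nil_append, pvI]
    by_cases h : 'a' ≤ c ∧ c ≤ 'z'
    · rw [if_pos (by simpa using h), if_pos h]
      simp
    · rw [if_neg (by simpa using h), if_neg h]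
  | cons d s ih =>
    intro k
    have harith : (k + ((d :: s).length : ℕ) : Int) = k + 1 + (s.length : ℕ) := by
      simp only [List.length_cons]
      push_cast
      ring
    simp only [List.cons_append, pvI]
    by_cases hc : 'a' ≤ c ∧ c ≤ 'z'
    · have ihc : pvI (s ++ [c]) (k + 1)
          = (pvI s (k + 1)).filter (fun p => !(p.1 == c)) ++ [(c, k + 1 + (s.length : ℕ))] := by
        rw [ih, if_pos hc]
      rw [if_pos hc, harith]
      by_cases hd : ('a' ≤ d ∧ d ≤ 'z') ∧ d ∉ s
      · by_cases hdc : d = c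
        · subst hdc
          rw [if_neg (by simp), ihc, if_pos hd, List.filter_cons, if_neg (by simp)]
        · rw [if_pos ⟨hd.1, by simp [hd.2, hdc]⟩, ihc, if_pos hd, List.filter_cons,
            if_pos (by simp [hdc]), List.cons_append]
      · rw [if_neg (fun hcon =>
          hd ⟨hcon.1, fun hm => hcon.2 (List.mem_append_left _ hm)⟩), ihc, if_neg hd]
    · have ihc : pvI (s ++ [c]) (k + 1) = pvI s (k + 1) := by
        rw [ih, if_neg hc]
      rw [if_neg hc]
      have hmem : (('a' ≤ d ∧ d ≤ 'z') ∧ d ∉ s ++ [c]) ↔ (('a' ≤ d ∧ d ≤ 'z') ∧ d ∉ s) := by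
        constructor
        · rintro ⟨h1, h2⟩
          exact ⟨h1, fun hm => h2 (List.mem_append_left _ hm)⟩
        · rintro ⟨h1, h2⟩
          refine ⟨h1, fun hm => ?_⟩
          rcases List.mem_append.mp hm with hm | hm
          · exact h2 hm
          · simp at hm
            subst hm
            exact hc h1
      by_cases hd : ('a' ≤ d ∧ d ≤ 'z') ∧ d ∉ s
      · rw [if_pos (hmem.mpr hd), if_pos hd, ihc]
      · rw [if_neg (fun hcon => hd (hmem.mp hcon)), if_neg hd, ihc]

theorem pv_map_overwrite (c : Char) (v : Int) : ∀ (l : List (Char × Int)),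
    (l.map (·.1)).Nodup → c ∈ l.map (·.1) →
    (l.map (fun p => if (p.1 == c) = true then (c, v) else p)).Perm
      (l.filter (fun p => !(p.1 == c)) ++ [(c, v)]) := by
  intro l
  induction l with
  | nil => intro _ h; simp at h
  | cons p l ih =>
    intro hnd hc
    simp only [List.map_cons, List.nodup_cons] at hnd
    by_cases hpc : p.1 = c
    · have htl : ∀ q ∈ l, ((fun p => !(p.1 == c)) q) = true := by
        intro q hq
        simp only [Bool.not_eq_true', beq_eq_false_iff_ne]
        intro hqc
        exact hnd.1 (by
          rw [hpc, ← hqc]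
          exact List.mem_map_of_mem hq)
      have hmap : l.map (fun p => if (p.1 == c) = true then (c, v) else p) = l := by
        have hco : ∀ q ∈ l, (fun p => if (p.1 == c) = true then (c, v) else p) q = id q := by
          intro q hq
          have := htl q hq
          simp only [Bool.not_eq_true', beq_eq_false_iff_ne] at this
          simp [this]
        rw [List.map_congr_left hco, List.map_id]
      have hfil : l.filter (fun p => !(p.1 == c)) = l := List.filter_eq_self.mpr htl
      rw [List.map_cons, if_pos (by simp [hpc]), hmap, List.filter_cons,
        if_neg (by simp [hpc]), hfil]
      exact (List.perm_append_singleton _ _).symm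
    · have hc' : c ∈ l.map (·.1) := by
        rcases List.mem_cons.mp hc with h | h
        · exact absurd h.symm hpc
        · exact h
      rw [List.map_cons, if_neg (by simp [hpc]), List.filter_cons, if_pos (by simp [hpc])]
      exact (ih hnd.2 hc').cons p

theorem pv_D_perm : ∀ (s : List Char),
    (((PySem.List.enumerate s 0).foldl
        (fun (d : PySem.Dict Char Int) p => if 'a' ≤ p.2 ∧ p.2 ≤ 'z' then d.insert p.2 p.1 else d)
        PySem.Dict.empty).keys.Nodup) ∧
    (((PySem.List.enumerate s 0).foldl
        (fun (d : PySem.Dict Char Int) p => if 'a' ≤ p.2 ∧ p.2 ≤ 'z' then d.insert p.2 p.1 else d)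
        PySem.Dict.empty).items.Perm (pvI s 0)) := by
  intro s
  induction s using List.reverseRecOn with
  | nil =>
    refine ⟨?_, ?_⟩
    · exact PySem.Dict.nodup_keys_empty
    · simp [PySem.List.enumerate_nil, pvI, PySem.Dict.empty, PySem.Dict.items]
  | append_singleton s c ih =>
    obtain ⟨hk, hp⟩ := ih
    rw [PySem.List.enumerate_append, List.foldl_append, PySem.List.enumerate_cons,
      PySem.List.enumerate_nil, pv_I_append]
    simp only [List.foldl_cons, List.foldl_nil]
    by_cases hc : 'a' ≤ c ∧ c ≤ 'z'
    · rw [if_pos hc, if_pos hc]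
      set D := (PySem.List.enumerate s 0).foldl
          (fun (d : PySem.Dict Char Int) p => if 'a' ≤ p.2 ∧ p.2 ≤ 'z' then d.insert p.2 p.1 else d)
          PySem.Dict.empty with hD
      by_cases hcont : D.contains c = true
      · refine ⟨PySem.Dict.nodup_keys_insert _ _ _ hk, ?_⟩
        rw [PySem.Dict.items_insert_of_contains _ _ hcont]
        have hckeys : c ∈ D.items.map (·.1) := by
          have hmk := (PySem.Dict.contains_iff_mem_keys D c).mp hcont
          simpa [PySem.Dict.keys] using hmk
        have hndi : (D.items.map (·.1)).Nodup := by
          simpa [PySem.Dict.keys] using hk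
        refine (pv_map_overwrite c _ D.items hndi hckeys).trans ?_
        exact (hp.filter _).append_right _
      · refine ⟨PySem.Dict.nodup_keys_insert _ _ _ hk, ?_⟩
        rw [PySem.Dict.items_insert_of_not_contains _ _ (by simpa using hcont)]
        have hfil : (pvI s 0).filter (fun p => !(p.1 == c)) = pvI s 0 := by
          apply List.filter_eq_self.mpr
          intro q hq
          simp only [Bool.not_eq_true', beq_eq_false_iff_ne]
          intro he
          apply hcont
          apply (PySem.Dict.contains_iff_mem_keys D c).mpr
          have hqi : q ∈ D.items := (hp.mem_iff).mpr hq
          have : q.1 ∈ D.keys := by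
            simpa [PySem.Dict.keys] using List.mem_map_of_mem (f := (·.1)) hqi
          rwa [he] at this
        rw [hfil]
        exact hp.append_right _
    · rw [if_neg hc, if_neg hc]
      exact ⟨hk, hp⟩

-- ===== VERDICT (by name: the statement is the Claim_ definition above) =====
theorem disord_spec : Claim_equal_disord := by
  intro chiave _
  show disord chiave = disord_alt chiave
  simp only [disord, disord_alt]
  rw [pv_chiave2, pv_fold_snd, List.append_nil, pv_A_list, pv_dedup_last]
  rw [PySem.List.sorted_eq_of_perm_of_pairwise_lt _ (pvI chiave.toList 0) _
    (pv_D_perm chiave.toList).2.symm (pv_I_pairwise chiave.toList 0)]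
  rw [pv_J_eq_map_I]
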